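-- pv_equiv track=rewrite | github.com/Paswalt/Pyground | Automata/parser.py | sanitizeStates
-- ===== SOURCE A (Python) =====
-- def sanitizeStates(statedefs):
--     d = dict()
--     res = []
--     for sdef in statedefs:
--         if sdef[0] not in d:
--             d[sdef[0]] = (sdef[1], sdef[2])
--         else:
--             d[sdef[0]] = (d[sdef[0]][0] or sdef[1], d[sdef[0]][1] or sdef[2])
--     for key in d:
--         res.append((key,) + d[key])
--     return res
-- ===== SOURCE B (Python) =====
-- def sanitizeStates(statedefs):
--     # pass 1: keys in first-occurrence order (no dict)
--     keys = []
--     for s in statedefs: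
--         if s[0] not in keys:
--             keys.append(s[0])
--     # pass 2: for each key, OR together the flags of all its definitions
--     res = []
--     for k in keys:
--         f1, f2 = False, False
--         for s in statedefs:
--             if s[0] == k:
--                 f1, f2 = f1 or s[1], f2 or s[2]
--         res.append((k, f1, f2))
--     return res
-- ===== Notes on version B (the rewrite author's own statement) =====
-- stated objective: alternative
-- what changed: A merges in one pass through a dict keyed by state name and then materializes it; B uses no dict at all: it first collects the keys in first-occurrence order, then for each key rescans the whole input OR-ing that key's flags (staged nested scans instead of a single-pass hash merge).
import Mathlib
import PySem

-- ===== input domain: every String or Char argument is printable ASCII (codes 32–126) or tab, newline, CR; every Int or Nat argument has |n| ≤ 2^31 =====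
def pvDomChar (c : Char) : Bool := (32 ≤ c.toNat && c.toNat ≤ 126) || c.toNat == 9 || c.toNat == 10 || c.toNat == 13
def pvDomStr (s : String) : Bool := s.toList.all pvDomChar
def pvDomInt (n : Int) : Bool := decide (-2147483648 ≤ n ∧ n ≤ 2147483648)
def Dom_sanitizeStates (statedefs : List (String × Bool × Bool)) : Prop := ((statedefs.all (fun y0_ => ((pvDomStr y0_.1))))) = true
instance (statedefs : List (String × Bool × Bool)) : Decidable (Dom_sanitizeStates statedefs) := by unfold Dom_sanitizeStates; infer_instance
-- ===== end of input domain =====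

-- B drops the dict entirely: it first collects the keys in first-occurrence order, then for
-- each key rescans the whole input OR-ing that key's flags (staged nested scans instead of
-- A's single-pass dict merge); an alternative decomposition, not claimed faster.

-- ===== PORT A =====
-- the dict-filling loop body of A
def pvStepA (d : PySem.Dict String (Bool × Bool)) (sdef : String × Bool × Bool) :
    PySem.Dict String (Bool × Bool) :=
  if d.contains sdef.1 = false then
    d.insert sdef.1 (sdef.2.1, sdef.2.2)
  else
    d.insert sdef.1 ((d.getD sdef.1 (false, false)).1 || sdef.2.1,
                     (d.getD sdef.1 (false, false)).2 || sdef.2.2)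

def sanitizeStates (statedefs : List (String × Bool × Bool)) : List (String × Bool × Bool) :=
  let d := statedefs.foldl pvStepA PySem.Dict.empty
  -- second loop: for key in d: res.append((key,) + d[key])  (key is always present, so getD is exact)
  d.keys.foldl (fun res k => res ++ [(k, (d.getD k (false, false)).1, (d.getD k (false, false)).2)]) []

-- ===== PORT B =====
-- pass 1 of B: 'if s[0] not in keys: keys.append(s[0])' is exactly PySem.Set.add
def pvKeysB (statedefs : List (String × Bool × Bool)) : List String :=
  statedefs.foldl (fun ks s => PySem.Set.add ks s.1) PySem.Set.empty

-- the inner loop of B's pass 2: OR the flags of every definition of key k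
def pvMergeStep (k : String) (f : Bool × Bool) (s : String × Bool × Bool) : Bool × Bool :=
  if s.1 == k then (f.1 || s.2.1, f.2 || s.2.2) else f

def pvMergeB (statedefs : List (String × Bool × Bool)) (k : String) : Bool × Bool :=
  statedefs.foldl (pvMergeStep k) (false, false)

def sanitizeStates_alt (statedefs : List (String × Bool × Bool)) : List (String × Bool × Bool) :=
  (pvKeysB statedefs).foldl
    (fun res k => res ++ [(k, (pvMergeB statedefs k).1, (pvMergeB statedefs k).2)]) []

-- ===== PRECONDITION & SPEC =====
def Spec_sanitizeStates (statedefs : List (String × Bool × Bool)) (out : List (String × Bool × Bool)) : Prop := out = sanitizeStates_alt statedefs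
instance (statedefs : List (String × Bool × Bool)) (out : List (String × Bool × Bool)) : Decidable (Spec_sanitizeStates statedefs out) := by unfold Spec_sanitizeStates; infer_instance

-- ===== CLAIM (what is proved, stated in full; the proofs are below) =====
def Claim_equal_sanitizeStates : Prop := ∀ (statedefs : List (String × Bool × Bool)), Dom_sanitizeStates statedefs → Spec_sanitizeStates statedefs (sanitizeStates statedefs)

-- ===== LEMMAS AND PROOFS =====

-- A's loop body always inserts at key sdef.1 (both branches do)
lemma pvStepA_eq_insert (d : PySem.Dict String (Bool × Bool)) (s : String × Bool × Bool) :
    pvStepA d s = d.insert s.1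
      (if d.contains s.1 = false then (s.2.1, s.2.2)
       else ((d.getD s.1 (false, false)).1 || s.2.1, (d.getD s.1 (false, false)).2 || s.2.2)) := by
  unfold pvStepA; split_ifs <;> rfl

-- A's dict keys are the input keys deduped in first-occurrence order = B's pass 1
lemma pvKeysA (l : List (String × Bool × Bool)) :
    (l.foldl pvStepA PySem.Dict.empty).keys = pvKeysB l := by
  have h : l.foldl pvStepA PySem.Dict.empty =
      l.foldl (fun d s => d.insert s.1
        (if d.contains s.1 = false then (s.2.1, s.2.2)
         else ((d.getD s.1 (false, false)).1 || s.2.1,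
               (d.getD s.1 (false, false)).2 || s.2.2))) PySem.Dict.empty := by
    congr 1; funext d s; exact pvStepA_eq_insert d s
  rw [h, PySem.Dict.keys_foldl_insert_key, PySem.Dict.keys_empty, pvKeysB,
      ← PySem.Set.update_map_eq_foldl_add]
  rfl

-- folding the merge step from an arbitrary accumulator ORs the accumulator in front
lemma pvMerge_acc (k : String) (l : List (String × Bool × Bool)) (a : Bool × Bool) :
    l.foldl (pvMergeStep k) a = (a.1 || (pvMergeB l k).1, a.2 || (pvMergeB l k).2) := by
  induction l generalizing a with
  | nil => simp [pvMergeB]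
  | cons s t ih =>
    rw [pvMergeB, List.foldl_cons, List.foldl_cons, ih, ih (pvMergeStep k (false, false) s)]
    unfold pvMergeStep
    by_cases h : (s.1 == k) = true <;> simp [h, Bool.or_assoc]

-- A's dict lookup after the whole fold, characterised by B's merge fold
lemma pvGetA (l : List (String × Bool × Bool)) (d : PySem.Dict String (Bool × Bool)) (k : String) :
    (l.foldl pvStepA d).get? k =
      match d.get? k with
      | some v => some (v.1 || (pvMergeB l k).1, v.2 || (pvMergeB l k).2)
      | none => if l.any (fun s => s.1 == k) then some (pvMergeB l k) else none := by
  induction l generalizing d with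
  | nil =>
    cases hd : d.get? k <;> simp [pvMergeB, hd]
  | cons s t ih =>
    rw [List.foldl_cons, ih]
    have hmerge : pvMergeB (s :: t) k = t.foldl (pvMergeStep k) (pvMergeStep k (false, false) s) := by
      rfl
    by_cases hk : s.1 = k
    · subst hk
      have hstep : pvMergeStep s.1 (false, false) s = (s.2.1, s.2.2) := by
        simp [pvMergeStep]
      cases hd : d.get? s.1 with
      | some v =>
        have hc : d.contains s.1 = true := by
          rw [PySem.Dict.contains_eq_isSome_get?, hd]; rfl
        have hgd : d.getD s.1 (false, false) = v := PySem.Dict.getD_of_get?_eq_some d (false, false) hd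
        have hA : pvStepA d s = d.insert s.1 (v.1 || s.2.1, v.2 || s.2.2) := by
          simp [pvStepA, hc, hgd]
        rw [hA, PySem.Dict.get?_insert_self, hmerge, hstep, pvMerge_acc]
        simp [Bool.or_assoc]
      | none =>
        have hc : d.contains s.1 = false := by
          rw [PySem.Dict.contains_eq_isSome_get?, hd]; rfl
        have hA : pvStepA d s = d.insert s.1 (s.2.1, s.2.2) := by
          simp [pvStepA, hc]
        rw [hA, PySem.Dict.get?_insert_self, hmerge, hstep, pvMerge_acc]
        simp
    · have hb : (s.1 == k) = false := beq_eq_false_iff_ne.mpr hk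
      have hget : (pvStepA d s).get? k = d.get? k := by
        rw [pvStepA_eq_insert, PySem.Dict.get?_insert_of_ne d _ (Ne.symm hk)]
      rw [hget, hmerge]
      have hstep : pvMergeStep k (false, false) s = (false, false) := by
        simp [pvMergeStep, hb]
      rw [hstep, ← pvMergeB]
      simp [hb]

-- appending in a loop is a map
lemma pvFoldAppend {α β : Type} (l : List α) (g : α → β) (acc : List β) :
    l.foldl (fun res k => res ++ [g k]) acc = acc ++ l.map g := by
  induction l generalizing acc with
  | nil => simp
  | cons x xs ih => simp [List.foldl_cons, ih]

-- every key B collects occurs in the input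
lemma pvKeysB_mem (l : List (String × Bool × Bool)) (k : String) (h : k ∈ pvKeysB l) :
    l.any (fun s => s.1 == k) = true := by
  rw [pvKeysB, PySem.Set.mem_foldl_add] at h
  rcases h with h | ⟨s, hs, rfl⟩
  · simp [PySem.Set.empty] at h
  · exact List.any_eq_true.mpr ⟨s, hs, by simp⟩

-- ===== VERDICT (by name: the statement is the Claim_ definition above) =====
theorem sanitizeStates_spec : Claim_equal_sanitizeStates := by
  intro statedefs _hdom
  unfold Spec_sanitizeStates sanitizeStates sanitizeStates_alt
  rw [pvFoldAppend, pvFoldAppend, List.nil_append, List.nil_append, pvKeysA]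
  apply List.map_congr_left
  intro k hk
  have hget : (statedefs.foldl pvStepA PySem.Dict.empty).get? k = some (pvMergeB statedefs k) := by
    rw [pvGetA, PySem.Dict.get?_empty]
    simp [pvKeysB_mem statedefs k hk]
  rw [PySem.Dict.getD_of_get?_eq_some _ (false, false) hget]
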